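-- pv_equiv track=rewrite | github.com/Mz-Vl/goit-algo-hw-06 | bfs.py | bfs
-- ===== SOURCE A (Python) =====
-- from collections import deque
--
-- def bfs(graph, start):
--     visited = set()
--     queue = deque([start])
--     paths = {start: [start]}
--
--     while queue:
--         current_vertex = queue.popleft()
--
--         if current_vertex not in visited:
--             visited.add(current_vertex)
--
--             for neighbor in graph[current_vertex]:
--                 if neighbor not in visited:
--                     queue.append(neighbor)
--                     paths[neighbor] = paths[current_vertex] + [neighbor]
--
--     return paths
-- ===== SOURCE B (Python) =====
-- from collections import deque
--
-- def bfs(graph, start):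
--     # Same BFS discipline, but record only a predecessor per vertex and
--     # rebuild all paths once after the traversal (no per-enqueue list copying).
--     visited = set()
--     queue = deque([start])
--     parent = {start: start}
--
--     while queue:
--         current_vertex = queue.popleft()
--
--         if current_vertex not in visited:
--             visited.add(current_vertex)
--
--             for neighbor in graph[current_vertex]:
--                 if neighbor not in visited:
--                     queue.append(neighbor)
--                     parent[neighbor] = current_vertex
--
--     paths = {}
--     for vertex in parent:
--         chain = []
--         v = vertex
--         while v != start:
--             chain.append(v)
--             v = parent[v]
--         chain.append(start)
--         paths[vertex] = chain[::-1]
--     return paths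
-- ===== Notes on version B (the rewrite author's own statement) =====
-- stated objective: alternative
-- what changed: B keeps only a predecessor per vertex during the identical BFS loop and rebuilds every path in one pass after the traversal, instead of A's copying and storing a full path list at each enqueue; Pre_ excludes inputs where A raises KeyError (a reached vertex missing from graph) and, being the natural closed-form well-formedness condition, also graphs whose dangling neighbours are unreachable (there A returns and B returns the same value).
-- outside the precondition, e.g. on bfs({'a': [], 'b': ['c']}, 'a'): A returns {'a': ['a']}, B returns {'a': ['a']}
import Mathlib
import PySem

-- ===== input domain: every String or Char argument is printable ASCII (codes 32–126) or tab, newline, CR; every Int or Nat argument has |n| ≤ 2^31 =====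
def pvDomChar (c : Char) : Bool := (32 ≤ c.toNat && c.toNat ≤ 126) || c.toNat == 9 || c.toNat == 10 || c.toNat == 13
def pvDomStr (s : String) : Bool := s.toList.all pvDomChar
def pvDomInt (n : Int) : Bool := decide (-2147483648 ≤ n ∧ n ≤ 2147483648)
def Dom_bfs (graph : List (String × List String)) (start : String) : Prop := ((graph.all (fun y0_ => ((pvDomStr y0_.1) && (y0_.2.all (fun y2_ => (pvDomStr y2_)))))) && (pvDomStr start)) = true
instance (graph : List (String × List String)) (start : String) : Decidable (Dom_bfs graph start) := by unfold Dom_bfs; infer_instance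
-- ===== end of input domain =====

-- B replaces A's per-enqueue full-path copying by a predecessor table plus a single
-- reconstruction pass after the BFS loop; equal return value on all of Pre_.

-- ===== PORT A =====
def bfsFuel (graph : List (String × List String)) : Nat :=
  (graph.map (fun p => p.2.length)).sum + 1

-- body of A's 'for neighbor in graph[current_vertex]' loop
def bfsStepA (visited' : PySem.Set String) (c : String)
    (st : List String × PySem.Dict String (List String)) (n : String) :
    List String × PySem.Dict String (List String) :=
  if PySem.Set.contains visited' n then st
  else (st.1 ++ [n], st.2.insert n (st.2.getD c [] ++ [n]))
  -- paths[current_vertex] is always present when c is being processed (set at enqueue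
  -- time or initially); the [] default of getD is never used on such states

-- A's while loop; fuel bounds the number of dequeues (total enqueues + 1), so the
-- 0-fuel guard is never reached on the states bfs builds
def bfsLoopA (g : PySem.Dict String (List String)) :
    Nat → List String → PySem.Set String → PySem.Dict String (List String) →
    PySem.Dict String (List String)
  | 0, _, _, paths => paths
  | _ + 1, [], _, paths => paths
  | f + 1, c :: queue, visited, paths =>
    if PySem.Set.contains visited c then bfsLoopA g f queue visited paths
    else
      match g.get? c with
      | none => paths   -- Python raises KeyError here: excluded by Pre_bfs
      | some adj =>
        let visited' := PySem.Set.add visited c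
        let st := adj.foldl (bfsStepA visited' c) (queue, paths)
        bfsLoopA g f st.1 visited' st.2

def bfs (graph : List (String × List String)) (start : String) : List (String × List String) :=
  (bfsLoopA (PySem.Dict.ofList graph) (bfsFuel graph) [start] PySem.Set.empty
    (PySem.Dict.empty.insert start [start])).items

-- ===== PORT B =====
-- body of B's 'for neighbor in graph[current_vertex]' loop: record predecessor only
def bfsStepB (visited' : PySem.Set String) (c : String)
    (st : List String × PySem.Dict String String) (n : String) :
    List String × PySem.Dict String String :=
  if PySem.Set.contains visited' n then st
  else (st.1 ++ [n], st.2.insert n c)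

-- B's while loop (same control as A's, maintaining parent instead of paths)
def bfsLoopB (g : PySem.Dict String (List String)) :
    Nat → List String → PySem.Set String → PySem.Dict String String →
    PySem.Dict String String
  | 0, _, _, parent => parent
  | _ + 1, [], _, parent => parent
  | f + 1, c :: queue, visited, parent =>
    if PySem.Set.contains visited c then bfsLoopB g f queue visited parent
    else
      match g.get? c with
      | none => parent   -- Python raises KeyError here: excluded by Pre_bfs
      | some adj =>
        let visited' := PySem.Set.add visited c
        let st := adj.foldl (bfsStepB visited' c) (queue, parent)
        bfsLoopB g f st.1 visited' st.2

-- B's inner 'while v != start' walk; a parent chain visits pairwise-distinct keys, so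
-- fuel = number of parent entries + 1 is never exhausted on the states B produces, and
-- parent[v] (here getD with an unused default) is always present there
def walkB (parent : PySem.Dict String String) (start : String) :
    Nat → String → List String → List String
  | 0, _, chain => (chain ++ [start]).reverse
  | f + 1, v, chain =>
    if v = start then (chain ++ [start]).reverse
    else walkB parent start f (parent.getD v v) (chain ++ [v])

-- B's 'for vertex in parent:' reconstruction loop
def mkPaths (parent : PySem.Dict String String) (start : String) :
    PySem.Dict String (List String) :=
  parent.items.foldl
    (fun paths kv => paths.insert kv.1 (walkB parent start (parent.size + 1) kv.1 []))
    PySem.Dict.empty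

def bfs_alt (graph : List (String × List String)) (start : String) : List (String × List String) :=
  (mkPaths (bfsLoopB (PySem.Dict.ofList graph) (bfsFuel graph) [start] PySem.Set.empty
    (PySem.Dict.empty.insert start start)) start).items

-- ===== PRECONDITION & SPEC =====
-- Pre_ excludes the inputs where A raises KeyError (a reached vertex missing from graph);
-- it also excludes graphs whose dangling neighbours happen to be unreachable from start
-- (A still returns there, and B returns the same value) because 'every listed neighbour
-- and start are keys of graph' is the natural closed-form well-formedness condition.
def Pre_bfs (graph : List (String × List String)) (start : String) : Prop :=
  (PySem.Dict.ofList graph).contains start = true ∧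
  ∀ p ∈ (PySem.Dict.ofList graph).items, ∀ v ∈ p.2,
    (PySem.Dict.ofList graph).contains v = true
instance (graph : List (String × List String)) (start : String) : Decidable (Pre_bfs graph start) := by
  unfold Pre_bfs; infer_instance

def pvWitness_bfs : (List (String × List String)) × String :=
  ([("a", ["b", "c"]), ("b", ["c"]), ("c", [])], "a")

def Spec_bfs (graph : List (String × List String)) (start : String) (out : List (String × List String)) : Prop := out = bfs_alt graph start
instance (graph : List (String × List String)) (start : String) (out : List (String × List String)) : Decidable (Spec_bfs graph start out) := by unfold Spec_bfs; infer_instance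

-- ===== CLAIM (what is proved, stated in full; the proofs are below) =====
def Claim_equal_bfs : Prop := ∀ (graph : List (String × List String)) (start : String), Dom_bfs graph start → Pre_bfs graph start → Spec_bfs graph start (bfs graph start)

-- ===== LEMMAS AND PROOFS =====

-- iterated predecessor lookup: itrP parent k i = the i-th vertex on k's parent chain
def itrP (parent : PySem.Dict String String) (k : String) : Nat → String
  | 0 => k
  | i + 1 => parent.getD (itrP parent k i) (itrP parent k i)

-- the path that reconstruction yields for a chain of length n
def pathOf (parent : PySem.Dict String String) (start k : String) (n : Nat) : List String :=
  ((List.range n).map (itrP parent k) ++ [start]).reverse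

-- the relation the two loops maintain between A's paths dict and B's parent dict
structure BfsInv (g : PySem.Dict String (List String)) (start : String)
    (visited : PySem.Set String) (queue : List String)
    (parent : PySem.Dict String String) (paths : PySem.Dict String (List String)) : Prop where
  hs_mem : start ∈ visited
  hs_par : parent.get? start = some start
  hnodup : parent.keys.Nodup
  hkeys : paths.keys = parent.keys
  hq : ∀ v ∈ queue, v ∈ parent.keys ∧ g.contains v = true
  hvis : ∀ v ∈ visited, v ∈ parent.keys
  hrel : ∀ k ∈ parent.keys, ∃ n : Nat,
    itrP parent k n = start ∧
    (∀ i < n, itrP parent k i ≠ start) ∧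
    (∀ i, 0 < i → i ≤ n → itrP parent k i ∈ visited) ∧
    ((List.range (n + 1)).map (itrP parent k)).Nodup ∧
    paths.get? k = some (pathOf parent start k n)

lemma itr_shift (parent : PySem.Dict String String) (k : String) (i : Nat) :
    itrP parent (parent.getD k k) i = itrP parent k (i + 1) := by
  induction i with
  | zero => rfl
  | succ i ih => simp [itrP, ih]

lemma itr_insert (parent : PySem.Dict String String) (x c k : String) (m : Nat)
    (h : ∀ i < m, itrP parent k i ≠ x) :
    ∀ i ≤ m, itrP (parent.insert x c) k i = itrP parent k i := by
  intro i hi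
  induction i with
  | zero => rfl
  | succ i ih =>
    have h1 := ih (Nat.le_of_succ_le hi)
    simp only [itrP, h1]
    exact PySem.Dict.getD_insert_of_ne parent c (itrP parent k i) (h i (Nat.lt_of_succ_le hi))

lemma walk_spec (parent : PySem.Dict String String) (start : String) :
    ∀ (n : Nat) (k : String) (chain : List String) (f : Nat), n < f →
      itrP parent k n = start → (∀ i < n, itrP parent k i ≠ start) →
      walkB parent start f k chain =
        (chain ++ (List.range n).map (itrP parent k) ++ [start]).reverse := by
  intro n
  induction n with
  | zero =>
    intro k chain f hf h0 _
    obtain ⟨f, rfl⟩ : ∃ f', f = f' + 1 := ⟨f - 1, by omega⟩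
    have hk : k = start := h0
    simp [walkB, hk]
  | succ n ih =>
    intro k chain f hf hn hlt
    obtain ⟨f, rfl⟩ : ∃ f', f = f' + 1 := ⟨f - 1, by omega⟩
    have hk : k ≠ start := hlt 0 (Nat.succ_pos n)
    have hstep : ∀ i, itrP parent (parent.getD k k) i = itrP parent k (i + 1) :=
      itr_shift parent k
    simp only [walkB, if_neg hk]
    rw [ih (parent.getD k k) (chain ++ [k]) f (by omega) (by rw [hstep]; exact hn)
      (fun i hi => by rw [hstep]; exact hlt (i + 1) (by omega))]
    congr 1
    rw [List.range_succ_eq_map, List.map_cons, List.map_map]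
    have : (List.map (itrP parent k ∘ Nat.succ) (List.range n)) =
        List.map (itrP parent (parent.getD k k)) (List.range n) :=
      List.map_congr_left (fun i _ => (hstep i).symm)
    rw [this]
    show chain ++ [k] ++ _ ++ [start] = chain ++ (itrP parent k 0 :: _) ++ [start]
    simp [itrP, List.append_assoc]

-- same keys, nodup chain inside keys ⟹ chain length bound
lemma chain_lt_fuel (parent : PySem.Dict String String) (k : String) (n : Nat)
    (hmem : ∀ i ≤ n, itrP parent k i ∈ parent.keys)
    (hnd : ((List.range (n + 1)).map (itrP parent k)).Nodup) :
    n < parent.size + 1 := by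
  have hsub : ((List.range (n + 1)).map (itrP parent k)) ⊆ parent.keys := by
    intro x hx
    obtain ⟨i, hi, rfl⟩ := List.mem_map.mp hx
    exact hmem i (by simpa using List.mem_range.mp hi)
  have := (List.subperm_of_subset hnd hsub).length_le
  simp only [List.length_map, List.length_range] at this
  have hsz : parent.keys.length = parent.size := by
    simp [PySem.Dict.keys, PySem.Dict.size]
  omega

lemma exit_eq (g : PySem.Dict String (List String)) (start : String)
    (visited : PySem.Set String) (queue : List String)
    (parent : PySem.Dict String String) (paths : PySem.Dict String (List String))
    (H : BfsInv g start visited queue parent paths) :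
    paths = mkPaths parent start := by
  have hnd := H.hnodup
  have hndp : paths.keys.Nodup := by rw [H.hkeys]; exact hnd
  apply PySem.Dict.ext
  have hfresh : ∀ a ∈ parent.items,
      (PySem.Dict.empty : PySem.Dict String (List String)).contains a.1 = false := by
    intro a _; simp [pysem]
  have hndm : (parent.items.map (fun kv => kv.1)).Nodup := by
    simpa [PySem.Dict.keys] using hnd
  rw [mkPaths, PySem.Dict.items_foldl_insert_fresh parent.items (fun kv => kv.1) _ _ hfresh hndm]
  rw [PySem.Dict.items_eq_map_keys paths hndp [], H.hkeys]
  have hkeys_eq : parent.keys = parent.items.map (fun kv => kv.1) := by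
    simp [PySem.Dict.keys]
  rw [hkeys_eq, List.map_map]
  have hemp : (PySem.Dict.empty : PySem.Dict String (List String)).items = [] := rfl
  rw [hemp, List.nil_append]
  apply List.map_congr_left
  intro kv hkv
  have hkmem : kv.1 ∈ parent.keys := PySem.Dict.mem_keys_of_mem_items parent hkv
  obtain ⟨n, hstart, hmin, hvism, hndc, hget⟩ := H.hrel kv.1 hkmem
  have hmem : ∀ i ≤ n, itrP parent kv.1 i ∈ parent.keys := by
    intro i hi
    rcases Nat.eq_zero_or_pos i with h0 | h0
    · subst h0; exact hkmem
    · exact H.hvis _ (hvism i h0 hi)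
  have hlt : n < parent.size + 1 := chain_lt_fuel parent kv.1 n hmem hndc
  have hwalk := walk_spec parent start n kv.1 [] (parent.size + 1) hlt hstart hmin
  simp only [Function.comp_apply]
  rw [PySem.Dict.getD_of_get?_eq_some paths [] hget, hwalk, pathOf, List.nil_append]

lemma fold_rel (g : PySem.Dict String (List String)) (start c : String)
    (visited' : PySem.Set String) (hc : c ∈ visited') :
    ∀ (adj : List String) (queue : List String)
      (parent : PySem.Dict String String) (paths : PySem.Dict String (List String)),
      BfsInv g start visited' queue parent paths →
      (∀ v ∈ adj, g.contains v = true) →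
      (adj.foldl (bfsStepA visited' c) (queue, paths)).1 =
        (adj.foldl (bfsStepB visited' c) (queue, parent)).1 ∧
      BfsInv g start visited' (adj.foldl (bfsStepB visited' c) (queue, parent)).1
        (adj.foldl (bfsStepB visited' c) (queue, parent)).2
        (adj.foldl (bfsStepA visited' c) (queue, paths)).2 := by
  intro adj
  induction adj with
  | nil => intro queue parent paths H _; exact ⟨rfl, H⟩
  | cons n adj ih =>
    intro queue parent paths H hadj
    have hadj' : ∀ v ∈ adj, g.contains v = true :=
      fun v hv => hadj v (List.mem_cons_of_mem _ hv)
    simp only [List.foldl_cons]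
    by_cases hn : PySem.Set.contains visited' n = true
    · simp only [bfsStepA, bfsStepB, if_pos hn]
      exact ih queue parent paths H hadj'
    · have hnv : n ∉ visited' := fun hm => hn ((PySem.Set.contains_iff _ _).mpr hm)
      have hcm : c ∈ parent.keys := H.hvis c hc
      have hcn : c ≠ n := fun h => hnv (h ▸ hc)
      have hsn : start ≠ n := fun h => hnv (h ▸ H.hs_mem)
      obtain ⟨nc, hcs, hcmin, hcvis, hcnd, hcget⟩ := H.hrel c hcm
      have havoid_c : ∀ i ≤ nc, itrP parent c i ≠ n := by
        intro i hi
        rcases Nat.eq_zero_or_pos i with h0 | h0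
        · subst h0; exact hcn
        · exact fun h => hnv (h ▸ hcvis i h0 hi)
      have hpres_c : ∀ i ≤ nc, itrP (parent.insert n c) c i = itrP parent c i :=
        itr_insert parent n c c nc (fun i hi => havoid_c i (Nat.le_of_lt hi)) 
      have hgetnn : (parent.insert n c).getD n n = c :=
        PySem.Dict.getD_insert_self parent n c n
      have hnew_shift : ∀ i, itrP (parent.insert n c) n (i + 1) =
          itrP (parent.insert n c) c i := by
        intro i
        rw [← itr_shift (parent.insert n c) n i, hgetnn]
      -- the new chain for n, as a list
      have hchainlist : ∀ m ≤ nc + 1, (List.range (m + 1)).map (itrP (parent.insert n c) n) =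
          n :: (List.range m).map (itrP parent c) := by
        intro m hm
        rw [List.range_succ_eq_map, List.map_cons, List.map_map]
        refine congrArg₂ _ rfl ?_
        apply List.map_congr_left
        intro i hi
        have hi' : i < m := List.mem_range.mp hi
        show itrP (parent.insert n c) n (i + 1) = itrP parent c i
        rw [hnew_shift i, hpres_c i (by omega)]
      have HI : BfsInv g start visited' (queue ++ [n]) (parent.insert n c)
          (paths.insert n (paths.getD c [] ++ [n])) := by
        constructor
        · exact H.hs_mem
        · rw [PySem.Dict.get?_insert_of_ne parent c hsn]; exact H.hs_par
        · exact PySem.Dict.nodup_keys_insert _ _ _ H.hnodup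
        · by_cases hcont : parent.contains n = true
          · have hcontp : paths.contains n = true := by
              rw [PySem.Dict.contains_iff_mem_keys, H.hkeys]
              exact (PySem.Dict.contains_iff_mem_keys _ _).mp hcont
            rw [PySem.Dict.keys_insert_of_contains _ _ hcontp,
              PySem.Dict.keys_insert_of_contains _ _ hcont]
            exact H.hkeys
          · have hcontp : paths.contains n = false := by
              rw [Bool.eq_false_iff]
              intro hx
              rw [PySem.Dict.contains_iff_mem_keys, H.hkeys,
                ← PySem.Dict.contains_iff_mem_keys] at hx
              exact (Bool.eq_false_iff.mp (Bool.not_eq_true _ ▸ (by simpa using hcont))) hx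
            rw [PySem.Dict.keys_insert_of_not_contains _ _ hcontp,
              PySem.Dict.keys_insert_of_not_contains _ _ (by simpa using hcont), H.hkeys]
        · intro v hv
          rcases List.mem_append.mp hv with hv | hv
          · obtain ⟨h1, h2⟩ := H.hq v hv
            exact ⟨(PySem.Dict.mem_keys_insert _ _ _ _).mpr (Or.inr h1), h2⟩
          · have : v = n := by simpa using hv
            subst this
            exact ⟨(PySem.Dict.mem_keys_insert _ _ _ _).mpr (Or.inl rfl),
              hadj v List.mem_cons_self⟩
        · intro v hv
          exact (PySem.Dict.mem_keys_insert _ _ _ _).mpr (Or.inr (H.hvis v hv))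
        · intro k hk
          by_cases hkn : k = n
          · rw [hkn]
            refine ⟨nc + 1, ?_, ?_, ?_, ?_, ?_⟩
            · rw [hnew_shift nc, hpres_c nc le_rfl]; exact hcs
            · intro i hi
              match i with
              | 0 => exact fun h => hsn h.symm
              | j + 1 =>
                rw [hnew_shift j, hpres_c j (by omega)]
                exact hcmin j (by omega)
            · intro i h0 hi
              match i with
              | j + 1 =>
                rw [hnew_shift j, hpres_c j (by omega)]
                match j with
                | 0 => exact hc
                | j' + 1 => exact hcvis (j' + 1) (Nat.succ_pos _) (by omega)
            · rw [hchainlist (nc + 1) le_rfl]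
              refine List.nodup_cons.mpr ⟨?_, hcnd⟩
              intro hmem
              obtain ⟨i, hi, hieq⟩ := List.mem_map.mp hmem
              exact havoid_c i (by simpa using List.mem_range.mp hi) hieq
            · rw [PySem.Dict.get?_insert_self]
              congr 1
              rw [PySem.Dict.getD_of_get?_eq_some paths [] hcget]
              show pathOf parent start c nc ++ [n] = pathOf (parent.insert n c) start n (nc + 1)
              rw [pathOf, pathOf, hchainlist nc (by omega), List.cons_append, List.reverse_cons]
          · have hkold : k ∈ parent.keys := by
              rcases (PySem.Dict.mem_keys_insert _ _ _ _).mp hk with h | h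
              · exact absurd h hkn
              · exact h
            obtain ⟨m, hms, hmmin, hmvis, hmnd, hmget⟩ := H.hrel k hkold
            have havoid_k : ∀ i ≤ m, itrP parent k i ≠ n := by
              intro i hi
              rcases Nat.eq_zero_or_pos i with h0 | h0
              · subst h0; exact hkn
              · exact fun h => hnv (h ▸ hmvis i h0 hi)
            have hpres_k : ∀ i ≤ m, itrP (parent.insert n c) k i = itrP parent k i :=
              itr_insert parent n c k m (fun i hi => havoid_k i (Nat.le_of_lt hi))
            have hmap : ∀ m' ≤ m + 1, (List.range m').map (itrP (parent.insert n c) k) =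
                (List.range m').map (itrP parent k) := by
              intro m' hm'
              apply List.map_congr_left
              intro i hi
              exact hpres_k i (by have := List.mem_range.mp hi; omega)
            refine ⟨m, ?_, ?_, ?_, ?_, ?_⟩
            · rw [hpres_k m le_rfl]; exact hms
            · intro i hi; rw [hpres_k i (Nat.le_of_lt hi)]; exact hmmin i hi
            · intro i h0 hi; rw [hpres_k i hi]; exact hmvis i h0 hi
            · rw [hmap (m + 1) le_rfl]; exact hmnd
            · rw [PySem.Dict.get?_insert_of_ne paths _ hkn, hmget, pathOf, pathOf,
                hmap m (by omega)]
      have := ih (queue ++ [n]) (parent.insert n c)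
        (paths.insert n (paths.getD c [] ++ [n])) HI hadj'
      simpa [bfsStepA, bfsStepB, hnv] using this

lemma loop_rel (g : PySem.Dict String (List String)) (start : String)
    (HPre : ∀ p ∈ g.items, ∀ v ∈ p.2, g.contains v = true) :
    ∀ (fuel : Nat) (queue : List String) (visited : PySem.Set String)
      (parent : PySem.Dict String String) (paths : PySem.Dict String (List String)),
      BfsInv g start visited queue parent paths →
      bfsLoopA g fuel queue visited paths =
        mkPaths (bfsLoopB g fuel queue visited parent) start := by
  intro fuel
  induction fuel with
  | zero =>
    intro queue visited parent paths H
    simp only [bfsLoopA, bfsLoopB]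
    exact exit_eq g start visited queue parent paths H
  | succ f ih =>
    intro queue visited parent paths H
    cases queue with
    | nil =>
      simp only [bfsLoopA, bfsLoopB]
      exact exit_eq g start visited [] parent paths H
    | cons c q =>
      simp only [bfsLoopA, bfsLoopB]
      have Hq : ∀ v ∈ q, v ∈ parent.keys ∧ g.contains v = true :=
        fun v hv => H.hq v (List.mem_cons_of_mem _ hv)
      by_cases hvc : PySem.Set.contains visited c = true
      · rw [if_pos hvc, if_pos hvc]
        exact ih q visited parent paths { H with hq := Hq }
      · rw [if_neg hvc, if_neg hvc]
        obtain ⟨hck, hcg⟩ := H.hq c List.mem_cons_self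
        obtain ⟨adj, hadj⟩ : ∃ adj, g.get? c = some adj := by
          rw [PySem.Dict.contains_eq_isSome_get?] at hcg
          cases hgc : g.get? c with
          | none => rw [hgc] at hcg; simp at hcg
          | some a => exact ⟨a, rfl⟩
        rw [hadj]
        have hc' : c ∈ PySem.Set.add visited c :=
          (PySem.Set.mem_add visited c c).mpr (Or.inr rfl)
        have Hpre : BfsInv g start (PySem.Set.add visited c) q parent paths := by
          refine ⟨(PySem.Set.mem_add visited c start).mpr (Or.inl H.hs_mem),
            H.hs_par, H.hnodup, H.hkeys, Hq, ?_, ?_⟩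
          · intro v hv
            rcases (PySem.Set.mem_add visited c v).mp hv with h | h
            · exact H.hvis v h
            · exact h ▸ hck
          · intro k hk
            obtain ⟨m, h1, h2, h3, h4, h5⟩ := H.hrel k hk
            exact ⟨m, h1, h2,
              fun i h0 hi => (PySem.Set.mem_add visited c _).mpr (Or.inl (h3 i h0 hi)),
              h4, h5⟩
        have hadjH : ∀ v ∈ adj, g.contains v = true :=
          HPre (c, adj) (PySem.Dict.mem_items_of_get?_eq_some g hadj)
        obtain ⟨hqeq, HF⟩ := fold_rel g start c (PySem.Set.add visited c) hc'
          adj q parent paths Hpre hadjH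
        have := ih _ _ _ _ HF
        simpa [hqeq] using this

-- ===== VERDICT (by name: the statement is the Claim_ definition above) =====
theorem bfs_spec : Claim_equal_bfs := by
  intro graph start _ hpre
  obtain ⟨hstart, HPre⟩ := hpre
  unfold Spec_bfs bfs bfs_alt bfsFuel
  obtain ⟨adj0, hadj0⟩ : ∃ a, (PySem.Dict.ofList graph).get? start = some a := by
    rw [PySem.Dict.contains_eq_isSome_get?] at hstart
    cases hgc : (PySem.Dict.ofList graph).get? start with
    | none => rw [hgc] at hstart; simp at hstart
    | some a => exact ⟨a, rfl⟩
  have hempty : PySem.Set.contains PySem.Set.empty start = false := by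
    simp [PySem.Set.contains]
  simp only [bfsLoopA, bfsLoopB, hempty, Bool.false_eq_true, if_false, hadj0]
  have hc' : start ∈ PySem.Set.add PySem.Set.empty start :=
    (PySem.Set.mem_add _ _ _).mpr (Or.inr rfl)
  have Hinit : BfsInv (PySem.Dict.ofList graph) start (PySem.Set.add PySem.Set.empty start)
      [] (PySem.Dict.empty.insert start start) (PySem.Dict.empty.insert start [start]) := by
    refine ⟨hc', PySem.Dict.get?_insert_self _ _ _,
      PySem.Dict.nodup_keys_insert _ _ _ PySem.Dict.nodup_keys_empty, ?_,
      by intro v hv; simp at hv, ?_, ?_⟩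
    · rw [PySem.Dict.keys_insert_of_not_contains _ _ (by simp [pysem]),
        PySem.Dict.keys_insert_of_not_contains _ _ (by simp [pysem])]
      rfl
    · intro v hv
      rcases (PySem.Set.mem_add _ _ _).mp hv with h | h
      · simp [PySem.Set.empty] at h
      · exact h ▸ (PySem.Dict.mem_keys_insert _ _ _ _).mpr (Or.inl rfl)
    · intro k hk
      rcases (PySem.Dict.mem_keys_insert _ _ _ _).mp hk with h | h
      · refine ⟨0, by rw [h]; rfl, by omega, by omega, by simp, ?_⟩
        rw [h, PySem.Dict.get?_insert_self]
        simp [pathOf]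
      · simp [PySem.Dict.keys_empty] at h
  have hadjH0 : ∀ v ∈ adj0, (PySem.Dict.ofList graph).contains v = true :=
    HPre (start, adj0) (PySem.Dict.mem_items_of_get?_eq_some _ hadj0)
  obtain ⟨hqeq, HF⟩ := fold_rel (PySem.Dict.ofList graph) start start
    (PySem.Set.add PySem.Set.empty start) hc' adj0 [] (PySem.Dict.empty.insert start start)
    (PySem.Dict.empty.insert start [start]) Hinit hadjH0
  have heval : PySem.Set.add PySem.Set.empty start = [start] := rfl
  rw [heval] at hqeq
  have := congrArg PySem.Dict.items
    (loop_rel (PySem.Dict.ofList graph) start HPre ((graph.map (fun p => p.2.length)).sum) _ _ _ _ HF)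
  rw [heval] at this
  simpa [hqeq] using this
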